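-- pv_equiv track=rewrite | github.com/Naren8520/mlforecast | mlforecast/core.py | _name_models
-- ===== SOURCE A (Python) =====
-- from collections import Counter, OrderedDict
--
-- def _name_models(current_names):
--     ctr = Counter(current_names)
--     if not ctr:
--         return []
--     if max(ctr.values()) < 2:
--         return current_names
--     names = current_names.copy()
--     for i, x in enumerate(reversed(current_names), start=1):
--         count = ctr[x]
--         if count > 1:
--             name = f"{x}{count}"
--             ctr[x] -= 1
--         else:
--             name = x
--         names[-i] = name
--     return names
-- ===== SOURCE B (Python) =====
-- from collections import Counter
--
-- def _name_models(current_names):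
--     seen = Counter()
--     out = []
--     for x in current_names:
--         seen[x] += 1
--         k = seen[x]
--         out.append(x if k == 1 else f"{x}{k}")
--     return out
-- ===== Notes on version B (the rewrite author's own statement) =====
-- stated objective: simpler
-- what changed: Replaces A's backward walk that decrements the precomputed total Counter and overwrites a copied list in place (plus its two early-return guards) with a single guard-free forward pass that increments a fresh counter and appends each label to a new list.
import Mathlib
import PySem

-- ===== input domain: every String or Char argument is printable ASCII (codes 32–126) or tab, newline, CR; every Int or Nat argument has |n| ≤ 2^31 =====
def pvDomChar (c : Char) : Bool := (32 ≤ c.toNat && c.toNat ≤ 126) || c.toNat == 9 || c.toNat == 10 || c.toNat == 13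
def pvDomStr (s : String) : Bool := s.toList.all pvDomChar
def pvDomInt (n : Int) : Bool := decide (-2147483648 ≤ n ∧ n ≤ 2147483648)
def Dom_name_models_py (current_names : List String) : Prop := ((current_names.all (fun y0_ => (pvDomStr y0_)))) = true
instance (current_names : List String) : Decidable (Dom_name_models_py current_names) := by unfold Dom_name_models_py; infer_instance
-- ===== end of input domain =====

-- B replaces A's reversed decrement-the-total-Counter in-place rewrite (and its two guards)
-- with one guard-free forward pass appending labels from a fresh incrementing counter; same output.

-- ===== PORT A =====
-- one step of A's for-loop: p = (i, x); state = (names, ctr); names[-i] = name is set at len-i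
def nmStepA (st : List String × PySem.Dict String Int) (p : Int × String) :
    List String × PySem.Dict String Int :=
  let count := st.2.getD p.2 0
  if count > 1 then
    (st.1.set (st.1.length - p.1.toNat) (p.2 ++ PySem.Int.toStr count),
     st.2.modify p.2 0 (· - 1))
  else
    (st.1.set (st.1.length - p.1.toNat) p.2, st.2)

def name_models_py (current_names : List String) : List String :=
  let ctr := PySem.Dict.counter current_names
  if ctr.size = 0 then []
  else
    match PySem.List.max? ctr.values (fun v => v) with
    | none => []  -- unreachable: ctr nonempty
    | some m =>
      if m < 2 then current_names
      else
        let names := current_names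
        ((PySem.List.enumerate current_names.reverse 1).foldl nmStepA (names, ctr)).1

-- ===== PORT B =====
-- one step of B's for-loop: state = (out, seen)
def nmStepB (st : List String × PySem.Dict String Int) (x : String) :
    List String × PySem.Dict String Int :=
  let seen := st.2.modify x 0 (· + 1)
  let k := seen.getD x 0
  (st.1 ++ [if k == 1 then x else x ++ PySem.Int.toStr k], seen)

def name_models_py_alt (current_names : List String) : List String :=
  (current_names.foldl nmStepB ([], PySem.Dict.empty)).1

-- ===== PRECONDITION & SPEC =====
def Spec_name_models_py (current_names : List String) (out : List String) : Prop := out = name_models_py_alt current_names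
instance (current_names : List String) (out : List String) : Decidable (Spec_name_models_py current_names out) := by unfold Spec_name_models_py; infer_instance

-- ===== CLAIM (what is proved, stated in full; the proofs are below) =====
def Claim_equal_name_models_py : Prop := ∀ (current_names : List String), Dom_name_models_py current_names → Spec_name_models_py current_names (name_models_py current_names)

-- ===== LEMMAS AND PROOFS =====

-- positional specification: label of x after prefix `pre` is x (first occurrence) or x{k}
def nmSpec : List String → List String → List String
  | _, [] => []
  | pre, x :: rest =>
    (if pre.count x = 0 then x else x ++ PySem.Int.toStr ((pre.count x : Int) + 1)) ::
      nmSpec (pre ++ [x]) rest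

lemma nmSpec_length (pre rest : List String) : (nmSpec pre rest).length = rest.length := by
  induction rest generalizing pre with
  | nil => rfl
  | cons x t ih => simp [nmSpec, ih]

-- B's fold computes acc ++ nmSpec pre rest when the counter holds the prefix counts
lemma loopB (rest : List String) : ∀ (pre acc : List String) (d : PySem.Dict String Int),
    (∀ y, d.getD y 0 = (pre.count y : Int)) →
    (rest.foldl nmStepB (acc, d)).1 = acc ++ nmSpec pre rest := by
  induction rest with
  | nil => intro pre acc d _; simp [nmSpec]
  | cons x t ih =>
    intro pre acc d hd
    have hx : (d.modify x 0 (· + 1)).getD x 0 = (pre.count x : Int) + 1 := by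
      rw [PySem.Dict.getD_modify_self, hd]
    have hif : (if ((pre.count x : Int) + 1) == 1 then x
          else x ++ PySem.Int.toStr ((pre.count x : Int) + 1))
        = (if pre.count x = 0 then x else x ++ PySem.Int.toStr ((pre.count x : Int) + 1)) := by
      by_cases h0 : pre.count x = 0
      · simp [h0]
      · have : ¬ ((pre.count x : Int) + 1 = 1) := by omega
        simp [h0, this]
    have hstep : nmStepB (acc, d) x
        = (acc ++ [if pre.count x = 0 then x else x ++ PySem.Int.toStr ((pre.count x : Int) + 1)],
           d.modify x 0 (· + 1)) := by
      simp only [nmStepB, hx, hif]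
    rw [List.foldl_cons, hstep,
        ih (pre ++ [x]) _ _ (by
          intro y
          rw [PySem.Dict.getD_modify]
          by_cases hy : y = x
      

    
          · subst hy; rw [if_pos rfl, hd]; simp
          · rw [if_neg hy, hd]
            have h1 : List.count y [x] = 0 := by rw [List.count_eq_zero]; simp [hy]
            simp [List.count_append, h1]),
        nmSpec, List.append_assoc]
    rfl

-- A's fold: peeling the yet-unprocessed prefix p from the right; s is the processed suffix
lemma loopA (p : List String) : ∀ (s : List String) (ctr : PySem.Dict String Int),
    (∀ y, ctr.getD y 0 = if p.count y + s.count y = 0 then 0 else max ((p.count y : Int)) 1) →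
    ((PySem.List.enumerate p.reverse ((s.length : Int) + 1)).foldl nmStepA
        (p ++ nmSpec p s, ctr)).1 = nmSpec [] (p ++ s) := by
  induction p using List.reverseRecOn with
  | nil => intro s ctr _; simp [PySem.List.enumerate_nil]
  | append_singleton p' x ih =>
    intro s ctr hc
    have hcx := hc x
    simp [List.count_append] at hcx
    have hcx' : ctr.getD x 0 = (p'.count x : Int) + 1 := hcx
    have hrev : (p' ++ [x]).reverse = x :: p'.reverse := by simp
    have hlen : (p' ++ [x] ++ nmSpec (p' ++ [x]) s).length = p'.length + 1 + s.length := by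
      simp [nmSpec_length]; omega
    have hidx : (p' ++ [x] ++ nmSpec (p' ++ [x]) s).length - ((s.length : Int) + 1).toNat
        = p'.length := by rw [hlen]; omega
    have hset : ∀ lbl : String, (p' ++ [x] ++ nmSpec (p' ++ [x]) s).set p'.length lbl
        = p' ++ lbl :: nmSpec (p' ++ [x]) s := by
      intro lbl
      rw [List.append_assoc, List.set_append_right _ _ (le_refl _)]
      simp
    have hstep : nmStepA (p' ++ [x] ++ nmSpec (p' ++ [x]) s, ctr) ((s.length : Int) + 1, x)
        = (p' ++ nmSpec p' (x :: s),
           if (p'.count x : Int) + 1 > 1 then ctr.modify x 0 (· - 1) else ctr) := by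
      have hnmc : nmSpec p' (x :: s)
          = (if p'.count x = 0 then x else x ++ PySem.Int.toStr ((p'.count x : Int) + 1)) ::
            nmSpec (p' ++ [x]) s := rfl
      simp only [nmStepA, hcx']
      by_cases h0 : p'.count x = 0
      · have hng : ¬ ((p'.count x : Int) + 1 > 1) := by omega
        rw [if_neg hng, if_neg hng, hidx, hset, hnmc, if_pos h0]
      · have hgt : (p'.count x : Int) + 1 > 1 := by omega
        rw [if_pos hgt, if_pos hgt, hidx, hset, hnmc, if_neg h0]
    rw [hrev, PySem.List.enumerate_cons, List.foldl_cons, hstep]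
    have hinv : ∀ y, (if (p'.count x : Int) + 1 > 1 then ctr.modify x 0 (· - 1) else ctr).getD y 0
        = if p'.count y + (x :: s).count y = 0 then 0 else max ((p'.count y : Int)) 1 := by
      intro y
      by_cases hy : y = x
      · subst hy
        have h1 : List.count y (y :: s) = List.count y s + 1 := by simp
        by_cases hgt : (p'.count y : Int) + 1 > 1
        · rw [if_pos hgt, PySem.Dict.getD_modify_self, hcx', if_neg (by omega)]
          omega
        · rw [if_neg hgt, hcx, if_neg (by omega)]
          omega
      · have h1 : List.count y (p' ++ [x]) = List.count y p' := by
          have h0 : List.count y [x] = 0 := by rw [List.count_eq_zero]; simp [hy]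
          rw [List.count_append, h0]; omega
        have h2 : List.count y (x :: s) = List.count y s := by
          simp [Ne.symm hy]
        have hcy := hc y
        rw [h1] at hcy
        by_cases hgt : (p'.count x : Int) + 1 > 1
        · rw [if_pos hgt, PySem.Dict.getD_modify_of_ne _ 0 _ hy, h2]; exact hcy
        · rw [if_neg hgt, h2]; exact hcy
    have := ih (x :: s) _ hinv
    rw [show ((s.length : Int) + 1) + 1 = (((x :: s).length : Int) + 1) from by simp]
    rw [this]
    simp

-- nmSpec is the identity when no name repeats
lemma nmSpec_of_unique (rest : List String) : ∀ (pre : List String),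
    (∀ x ∈ rest, pre.count x + rest.count x ≤ 1) → nmSpec pre rest = rest := by
  induction rest with
  | nil => intro _ _; rfl
  | cons x t ih =>
    intro pre h
    have hx := h x (by simp)
    simp [List.count_cons_self] at hx
    have h0 : pre.count x = 0 := by omega
    rw [nmSpec, if_pos h0, ih (pre ++ [x]) ?_]
    intro y hy
    have hty := h y (by simp [hy])
    rw [List.count_append]
    rcases eq_or_ne y x with hyx | hyx
    · subst hyx
      have htc : 1 ≤ t.count y := List.count_pos_iff.mpr hy
      have hxc : List.count y (y :: t) = t.count y + 1 := by simp
      omega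
    · have h1 : List.count y [x] = 0 := by rw [List.count_eq_zero]; simp [hyx]
      have h2 : List.count y (x :: t) = t.count y := by simp [Ne.symm hyx]
      omega

lemma alt_eq_nmSpec (cn : List String) : name_models_py_alt cn = nmSpec [] cn := by
  unfold name_models_py_alt
  rw [loopB cn [] [] PySem.Dict.empty (by intro y; simp [PySem.Dict.getD_empty])]
  simp

lemma a_main_eq_nmSpec (cn : List String) :
    ((PySem.List.enumerate cn.reverse 1).foldl nmStepA (cn, PySem.Dict.counter cn)).1
      = nmSpec [] cn := by
  have hinv : ∀ y, (PySem.Dict.counter cn).getD y 0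
      = if cn.count y + ([] : List String).count y = 0 then 0 else max ((cn.count y : Int)) 1 := by
    intro y
    rw [PySem.Dict.getD_counter]
    by_cases h0 : cn.count y = 0
    · simp [h0]
    · have h1 : (1:Int) ≤ (cn.count y : Int) := by omega
      simp [h0, max_eq_left h1]
  have := loopA cn [] (PySem.Dict.counter cn) hinv
  simpa [nmSpec] using this

-- ===== VERDICT (by name: the statement is the Claim_ definition above) =====
theorem name_models_py_spec : Claim_equal_name_models_py := by
  intro cn _
  show name_models_py cn = name_models_py_alt cn
  rw [alt_eq_nmSpec]
  unfold name_models_py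
  by_cases hnil : cn = []
  · subst hnil; rfl
  · have hvals : (PySem.Dict.counter cn).values
        = (PySem.Set.ofList cn).map (fun k => ((cn.count k : Int))) := by
      have := PySem.Dict.items_counter cn
      simp only [PySem.Dict.values, this, List.map_map]
      rfl
    have hne : (PySem.Set.ofList cn) ≠ [] := by
      rcases cn with _ | ⟨a, t⟩
      · exact absurd rfl hnil
      · intro h
        have : a ∈ PySem.Set.ofList (a :: t) := by simp [pysem]
        rw [h] at this; simp at this
    have hsz : ¬ ((PySem.Dict.counter cn).size = 0) := by
      show ¬ (PySem.Dict.counter cn).items.length = 0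
      rw [PySem.Dict.items_counter]
      simpa using hne
    rw [if_neg hsz]
    rcases hmax : PySem.List.max? (PySem.Dict.counter cn).values (fun v => v) with _ | m
    all_goals dsimp only
    · rw [PySem.List.max?_eq_none_iff] at hmax
      rw [hvals] at hmax
      exact absurd (List.map_eq_nil_iff.mp hmax) hne
    · by_cases hm : m < 2
      · rw [if_pos hm]
        have hle := PySem.List.max?_isMax hmax
        rw [nmSpec_of_unique cn [] ?_]
        intro y hy
        have hmem : ((cn.count y : Int)) ∈ (PySem.Dict.counter cn).values := by
          rw [hvals]
          exact List.mem_map.mpr ⟨y, by simp [pysem, hy], rfl⟩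
        have := hle _ hmem
        simp at this ⊢
        omega
      · rw [if_neg hm]
        exact a_main_eq_nmSpec cn
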